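-- pv_equiv track=rewrite | github.com/samnmbuguah/GTO-Wizard | backend/solutions/gto_api.py | translate_path_to_history
-- ===== SOURCE A (Python) =====
-- def translate_path_to_history(path: str) -> str:
--     """
--     Translates internal path format (root:c:r) to GTO Wizard's action_history format.
--     Example: root:c:r -> "k_b2.5" (Heuristic translation)
--     """
--     if path == 'root' or not path:
--         return ""
--
--     parts = path.split(':')
--     history = []
--
--     for p in parts:
--         if p == 'root': continue
--         if p == 'c':
--             # Map 'c' to 'k' (check) if early in move, or 'c' (call) if after bet
--             # Simplified: use 'k' for first action, 'c' for others
--             history.append('k' if not history else 'c')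
--         elif p == 'r':
--             # Map 'r' to 'b2.5' (bet) or 'r3x' (raise)
--             # Simplified: default to 2.5bb bet or 3x raise
--             history.append('b2.5' if not history else 'r3')
--
--     return "".join(history)
-- ===== SOURCE B (Python) =====
-- LATER = {'c': 'c', 'r': 'r3'}
--
-- def translate_path_to_history(path: str) -> str:
--     if path == 'root' or not path:
--         return ""
--     # Stage 1: map every segment uniformly through the later-action table
--     # (irrelevant segments contribute the empty string).
--     body = "".join(LATER.get(p, '') for p in path.split(':'))
--     # Stage 2: patch the first action in place: a leading 'c' was really a
--     # check 'k', a leading 'r3' was really a bet 'b2.5'.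
--     if body.startswith('c'):
--         return 'k' + body[1:]
--     if body.startswith('r'):
--         return 'b2.5' + body[2:]
--     return body
-- ===== Notes on version B (the rewrite author's own statement) =====
-- stated objective: alternative
-- what changed: B keeps no first-action state: it maps every path segment uniformly through the later-action table into one string, then patches that string's prefix to turn the first action into its first-action form, replacing A's in-loop flag that tests whether the history list is still empty.
import Mathlib
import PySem

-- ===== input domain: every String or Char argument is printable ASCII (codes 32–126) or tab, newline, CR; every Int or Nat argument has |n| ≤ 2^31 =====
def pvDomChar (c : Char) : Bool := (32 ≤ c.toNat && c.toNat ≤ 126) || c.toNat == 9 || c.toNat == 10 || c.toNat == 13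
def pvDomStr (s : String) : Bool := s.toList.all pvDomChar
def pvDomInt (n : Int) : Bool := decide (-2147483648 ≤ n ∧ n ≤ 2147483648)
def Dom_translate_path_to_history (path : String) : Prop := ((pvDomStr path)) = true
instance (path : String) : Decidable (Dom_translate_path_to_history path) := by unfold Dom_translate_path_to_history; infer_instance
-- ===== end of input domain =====

-- B maps every segment uniformly through the later-action table and then patches the
-- first action of the resulting string, instead of A's stateful first-action flag
-- inside the loop (objective: alternative decomposition, same cost).

-- ===== PORT A =====
-- the body of A's for-loop, with the running `history` list as state
def tpthStep (h : List String) (p : String) : List String :=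
  if p == "root" then h
  else if p == "c" then h ++ [if h.isEmpty then "k" else "c"]
  else if p == "r" then h ++ [if h.isEmpty then "b2.5" else "r3"]
  else h

def translate_path_to_history (path : String) : String :=
  if path == "root" || path == "" then ""
  else
    let parts := (PySem.Str.split? path ":").getD []   -- sep ":" ≠ "", so split? is some
    PySem.Str.join "" (parts.foldl tpthStep [])

-- ===== PORT B =====
def tpthLaterD : PySem.Dict String String := PySem.Dict.ofList [("c", "c"), ("r", "r3")]

def translate_path_to_history_alt (path : String) : String :=
  if path == "root" || path == "" then ""
  else
    let parts := (PySem.Str.split? path ":").getD []   -- sep ":" ≠ "", so split? is some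
    -- stage 1: map every segment through the later table, '' for irrelevant ones
    let body := PySem.Str.join "" (parts.map (fun p => (PySem.Dict.get? tpthLaterD p).getD ""))
    -- stage 2: patch the first action
    if PySem.Str.startswith body "c" then "k" ++ PySem.Str.slice body (some 1) none
    else if PySem.Str.startswith body "r" then "b2.5" ++ PySem.Str.slice body (some 2) none
    else body

-- ===== PRECONDITION & SPEC =====
def Spec_translate_path_to_history (path : String) (out : String) : Prop := out = translate_path_to_history_alt path
instance (path : String) (out : String) : Decidable (Spec_translate_path_to_history path out) := by unfold Spec_translate_path_to_history; infer_instance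

-- ===== CLAIM (what is proved, stated in full; the proofs are below) =====
def Claim_equal_translate_path_to_history : Prop := ∀ (path : String), Dom_translate_path_to_history path → Spec_translate_path_to_history path (translate_path_to_history path)

-- ===== LEMMAS AND PROOFS =====

-- proof-side vocabulary: the relevant tokens and the two pure mapping functions
def tpthIsCR (p : String) : Bool := p == "c" || p == "r"
def tpthFir (p : String) : String := if p == "c" then "k" else "b2.5"
def tpthLat (p : String) : String := if p == "c" then "c" else "r3"

def tpthBL : List String → List String
  | [] => []
  | t :: rest => tpthFir t :: rest.map tpthLat

lemma tpthLaterD_items : tpthLaterD.items = [("c", "c"), ("r", "r3")] := by rfl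

lemma tpth_getD (p : String) :
    (PySem.Dict.get? tpthLaterD p).getD "" = if tpthIsCR p then tpthLat p else "" := by
  by_cases h1 : p = "c"
  · subst h1; rfl
  · by_cases h2 : p = "r"
    · subst h2; rfl
    · simp [PySem.Dict.get?, tpthLaterD_items, List.find?, tpthIsCR, h1, h2,
        (by simpa using (beq_iff_eq (a := "c") (b := p)).ne.mpr (Ne.symm h1) : ("c" == p) = false),
        (by simpa using (beq_iff_eq (a := "r") (b := p)).ne.mpr (Ne.symm h2) : ("r" == p) = false)]

-- loop characterization: A's foldl equals the filtered list mapped head/tail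
lemma tpth_loop (parts : List String) (h : List String) :
    parts.foldl tpthStep h =
      h ++ (if h.isEmpty then tpthBL (parts.filter tpthIsCR)
            else (parts.filter tpthIsCR).map tpthLat) := by
  induction parts generalizing h with
  | nil => cases h <;> simp [tpthBL]
  | cons p rest ih =>
    by_cases hc : p = "c"
    · subst hc
      cases h with
      | nil => simp [tpthStep, ih, tpthIsCR, tpthBL, tpthFir]
      | cons a t => simp [tpthStep, ih, tpthIsCR, tpthLat]
    · by_cases hr : p = "r"
      · subst hr
        cases h with
        | nil => simp [tpthStep, ih, tpthIsCR, tpthBL, tpthFir]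
        | cons a t => simp [tpthStep, ih, tpthIsCR, tpthLat]
      · have hskip : tpthStep h p = h := by
          simp [tpthStep, hc, hr]
        have hfilt : tpthIsCR p = false := by
          simp [tpthIsCR, hc, hr]
        simp [List.foldl, hskip, ih, hfilt]

-- join with the empty separator is flatten of the char lists
lemma tpth_join_flatten (l : List String) :
    (PySem.Str.join "" l).toList = (l.map String.toList).flatten := by
  rw [PySem.Str.toList_join]
  induction l with
  | nil => simp [PySem.Chars.join_nil]
  | cons a rest ih =>
    cases rest with
    | nil => simp [PySem.Chars.join_singleton]
    | cons b r =>
      rw [List.map_cons, List.map_cons, PySem.Chars.join_cons_cons]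
      rw [List.map_cons] at ih
      rw [ih]
      simp

-- stage 1: body's characters are the flatten of the later-mapped filtered tokens
lemma tpth_body_list (parts : List String) :
    (((parts.map (fun p => (PySem.Dict.get? tpthLaterD p).getD "")).map String.toList)).flatten
      = ((parts.filter tpthIsCR).map (fun p => (tpthLat p).toList)).flatten := by
  induction parts with
  | nil => simp
  | cons p rest ih =>
    rw [List.map_cons, List.map_cons, List.flatten_cons, ih, tpth_getD]
    by_cases hp : tpthIsCR p = true
    · rw [if_pos hp, List.filter_cons_of_pos hp, List.map_cons, List.flatten_cons]
    · simp only [Bool.not_eq_true] at hp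
      rw [if_neg (by simp [hp]), List.filter_cons_of_neg (by simp [hp])]
      simp

lemma tpth_body (parts : List String) :
    (PySem.Str.join "" (parts.map (fun p => (PySem.Dict.get? tpthLaterD p).getD ""))).toList
      = ((parts.filter tpthIsCR).map (fun p => (tpthLat p).toList)).flatten := by
  rw [tpth_join_flatten, tpth_body_list]

-- ===== VERDICT (by name: the statement is the Claim_ definition above) =====
theorem translate_path_to_history_spec : Claim_equal_translate_path_to_history := by
  intro path _
  unfold Spec_translate_path_to_history translate_path_to_history translate_path_to_history_alt
  by_cases hroot : (path == "root" || path == "") = true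
  · simp [hroot]
  · simp only [Bool.not_eq_true] at hroot
    simp only [hroot, Bool.false_eq_true, if_false]
    set parts := (PySem.Str.split? path ":").getD [] with hparts
    set body := PySem.Str.join "" (parts.map (fun p => (PySem.Dict.get? tpthLaterD p).getD "")) with hbody
    have hbl : body.toList = ((parts.filter tpthIsCR).map (fun p => (tpthLat p).toList)).flatten :=
      tpth_body parts
    rw [tpth_loop]
    cases hT : parts.filter tpthIsCR with
    | nil =>
      have hb0 : body = "" := by
        rw [← String.toList_inj]; rw [hbl, hT]; rfl
      simp [hb0, tpthBL, PySem.Str.startswith]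
      rfl
    | cons t restT =>
      have htmem : t ∈ parts.filter tpthIsCR := by rw [hT]; exact List.mem_cons_self
      have htcr : tpthIsCR t = true := (List.mem_filter.mp htmem).2
      have hblT : body.toList = (tpthLat t).toList ++ (restT.map (fun p => (tpthLat p).toList)).flatten := by
        rw [hbl, hT]; simp
      simp only [List.isEmpty_nil, if_true, List.nil_append, tpthBL]
      rcases (by simpa [tpthIsCR] using htcr) with hc | hr
      · -- t = "c"
        subst hc
        have hbc : body.toList = 'c' :: (restT.map (fun p => (tpthLat p).toList)).flatten := by
          simpa [tpthLat] using hblT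
        have hsw : PySem.Str.startswith body "c" = true := by
          rw [PySem.Str.startswith_eq, PySem.Chars.startswith_iff, hbc]
          exact ⟨_, rfl⟩
        rw [if_pos hsw, ← String.toList_inj]
        rw [String.toList_append, tpth_join_flatten]
        have hslice : (PySem.Str.slice body (some 1) none).toList = body.toList.drop 1 := by
          simp [PySem.List.slice_from _ (by omega : (0:Int) ≤ 1)]
        rw [hslice, hbc]
        simp [tpthFir, Function.comp_def]
      · -- t = "r"
        subst hr
        have hbr : body.toList = 'r' :: '3' :: (restT.map (fun p => (tpthLat p).toList)).flatten := by
          simpa [tpthLat] using hblT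
        have hswc : PySem.Str.startswith body "c" = false := by
          rw [PySem.Str.startswith_eq, Bool.eq_false_iff]
          intro hcon
          rw [PySem.Chars.startswith_iff, hbr] at hcon
          rcases hcon with ⟨tl, htl⟩
          simp at htl
        have hsw : PySem.Str.startswith body "r" = true := by
          rw [PySem.Str.startswith_eq, PySem.Chars.startswith_iff, hbr]
          exact ⟨_, rfl⟩
        rw [if_neg (Bool.eq_false_iff.mp hswc), if_pos hsw, ← String.toList_inj]
        rw [String.toList_append, tpth_join_flatten]
        have hslice : (PySem.Str.slice body (some 2) none).toList = body.toList.drop 2 := by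
          simp [PySem.List.slice_from _ (by omega : (0:Int) ≤ 2)]
        rw [hslice, hbr]
        simp [tpthFir, Function.comp_def]
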